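-- pv_equiv track=rewrite | github.com/JiBing17/CompetitiveProgramming | finanicalPlanning.py | min_days_to_retire
-- ===== SOURCE A (Python) =====
-- def min_days_to_retire(n, M, investments):
--
--     # bounds for BSTA
--     left = 1
--     right = 10**10
--
--     while left < right:
--
--         mid = left + (right - left) // 2
--         bool = canRetire(mid, n, M, investments)
--
--         # adjust bounds for a smaller day
--         if bool:
--             right = mid
--         # adjust bounds for a bigger day
--         else:
--             left = mid + 1
--
--     return left
--
-- def canRetire(days, n, M, investments):
--
--     valid = []
--     for money, cost in investments:
--
--         # valid investment bank where we can break even given d days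
--         if cost  <= days * money:
--             valid.append((money, cost))
--
--     totalCost = 0
--     profit = 0
--
--     # calculate cost for each valid bank and profit made
--     for m, c in valid:
--         totalCost += c
--         profit += m * days
--
--     # true if we still have more than enough to retire given M
--     remainder =  profit - totalCost
--     return remainder >= M
-- ===== SOURCE B (Python) =====
-- def min_days_to_retire(n, M, investments):
--     CAP = 10**10
--     events = []
--     for money, cost in investments:
--         events += _pv_events(money, cost, CAP)
--     events.sort(key=lambda e: e[0])
--     bps = [e[0] for e in events]
--     slopes, s = [0], 0
--     for _, dm, _ in events:
--         s += dm
--         slopes.append(s)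
--     inters, t = [0], 0
--     for _, _, dc in events:
--         t += dc
--         inters.append(t)
--
--     def profit(d):
--         lo, hi = 0, len(bps)
--         while lo < hi:
--             mid = (lo + hi) // 2
--             if bps[mid] <= d:
--                 lo = mid + 1
--             else:
--                 hi = mid
--         return d * slopes[lo] - inters[lo]
--
--     lo, hi = 1, CAP
--     while lo < hi:
--         mid = (lo + hi) // 2
--         if profit(mid) >= M:
--             hi = mid
--         else:
--             lo = mid + 1
--     return lo
--
-- def _pv_events(money, cost, CAP):
--     # each investment is active on a contiguous day-interval; emit (start, +m, +c)
--     # and, when the interval ends before CAP, a cancelling (stop+1, -m, -c)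
--     if money > 0:
--         start = max(1, -((-cost) // money))
--         return [(start, money, cost)] if start <= CAP else []
--     if money == 0:
--         return [(1, money, cost)] if cost <= 0 else []
--     stop = cost // money  # floor division: active days are 1..stop
--     if stop < 1:
--         return []
--     if stop < CAP:
--         return [(1, money, cost), (stop + 1, -money, -cost)]
--     return [(1, money, cost)]
-- ===== Notes on version B (the rewrite author's own statement) =====
-- stated objective: alternative
-- what changed: Instead of re-scanning all investments for each of the ~34 binary-search probes, B precomputes each investment's activation day-interval via ceiling/floor division, compresses them into sorted breakpoint events with prefix sums, and answers each probe's profit query by a bisect over the breakpoints; the outer binary search over days is kept so B matches A exactly even where the profit function is non-monotone (negative money).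
import Mathlib
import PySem

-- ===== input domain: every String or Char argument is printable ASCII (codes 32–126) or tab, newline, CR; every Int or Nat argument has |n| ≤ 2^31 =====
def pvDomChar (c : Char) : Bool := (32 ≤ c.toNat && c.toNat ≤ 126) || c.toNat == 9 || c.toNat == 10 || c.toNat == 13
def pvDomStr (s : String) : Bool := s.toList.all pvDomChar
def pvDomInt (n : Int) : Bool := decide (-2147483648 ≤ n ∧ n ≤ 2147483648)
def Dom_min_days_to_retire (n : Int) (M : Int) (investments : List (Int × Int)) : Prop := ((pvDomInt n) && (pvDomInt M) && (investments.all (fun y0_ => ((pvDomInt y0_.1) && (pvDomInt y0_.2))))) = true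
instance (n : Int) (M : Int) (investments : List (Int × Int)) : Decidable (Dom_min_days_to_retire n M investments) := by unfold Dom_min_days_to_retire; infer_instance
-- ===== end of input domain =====

-- B replaces A's O(n) rescan of the investments on every binary-search probe by
-- precomputed activation-interval events (sorted, with prefix sums) and a bisect
-- per probe; the outer binary search over days is kept, so the two agree on all
-- inputs.

-- ===== PORT A =====
def canRetire (days : Int) (n : Int) (M : Int) (investments : List (Int × Int)) : Bool :=
  let valid := investments.foldl
    (fun acc p => if p.2 ≤ days * p.1 then acc ++ [p] else acc) ([] : List (Int × Int))
  let totalCost := valid.foldl (fun a p => a + p.2) (0 : Int)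
  let profit := valid.foldl (fun a p => a + p.1 * days) (0 : Int)
  decide (M ≤ profit - totalCost)

def aLoop (n : Int) (M : Int) (investments : List (Int × Int)) (left right : Int) : Int :=
  if h : left < right then
    let mid := left + PySem.Int.floordiv (right - left) 2
    if canRetire mid n M investments then aLoop n M investments left mid
    else aLoop n M investments (mid + 1) right
  else left
termination_by (right - left).toNat
decreasing_by
  · have h0 : (0:Int) ≤ PySem.Int.floordiv (right - left) 2 :=
      (PySem.Int.le_floordiv_iff_mul_le (by omega)).2 (by omega)
    have h1 : PySem.Int.floordiv (right - left) 2 < right - left :=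
      (PySem.Int.floordiv_lt_iff_lt_mul (by omega)).2 (by omega)
    omega
  · have h0 : (0:Int) ≤ PySem.Int.floordiv (right - left) 2 :=
      (PySem.Int.le_floordiv_iff_mul_le (by omega)).2 (by omega)
    omega

def min_days_to_retire (n : Int) (M : Int) (investments : List (Int × Int)) : Int :=
  aLoop n M investments 1 10000000000

-- ===== PORT B =====
def pvCAP : Int := 10000000000

-- _pv_events(money, cost, CAP): the day-interval on which (money, cost) is active,
-- as a start event (and a cancelling stop event when the interval ends before CAP)
def eventsOf (p : Int × Int) : List (Int × Int × Int) :=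
  if 0 < p.1 then
    let start := max 1 (-(PySem.Int.floordiv (-p.2) p.1))
    if start ≤ pvCAP then [(start, p.1, p.2)] else []
  else if p.1 = 0 then
    (if p.2 ≤ 0 then [(1, p.1, p.2)] else [])
  else
    let stop := PySem.Int.floordiv p.2 p.1
    if stop < 1 then []
    else if stop < pvCAP then [(1, p.1, p.2), (stop + 1, -p.1, -p.2)]
    else [(1, p.1, p.2)]

-- the inner bisect loop of profit(); indices are in range whenever Python reads
-- them (0 ≤ mid < len bps), so getD's default is never returned
def bisLoop (bps : List Int) (d : Int) (lo hi : Nat) : Nat :=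
  if h : lo < hi then
    let mid := (lo + hi) / 2
    if bps.getD mid 0 ≤ d then bisLoop bps d (mid + 1) hi
    else bisLoop bps d lo mid
  else lo
termination_by hi - lo
decreasing_by all_goals omega

-- profit(d); slopes[lo] / inters[lo] have lo ≤ len bps < len slopes, always in range
def profitQ (bps slopes inters : List Int) (d : Int) : Int :=
  let idx := bisLoop bps d 0 bps.length
  d * slopes.getD idx 0 - inters.getD idx 0

def bLoop (M : Int) (bps slopes inters : List Int) (lo hi : Int) : Int :=
  if h : lo < hi then
    let mid := PySem.Int.floordiv (lo + hi) 2
    if M ≤ profitQ bps slopes inters mid then bLoop M bps slopes inters lo mid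
    else bLoop M bps slopes inters (mid + 1) hi
  else lo
termination_by (hi - lo).toNat
decreasing_by
  · have h1 := PySem.Int.floordiv_two_mid_bounds (le_of_lt h)
    have h2 : PySem.Int.floordiv (lo + hi) 2 < hi :=
      (PySem.Int.floordiv_lt_iff_lt_mul (by omega)).2 (by omega)
    omega
  · have h1 := PySem.Int.floordiv_two_mid_bounds (le_of_lt h)
    omega

def min_days_to_retire_alt (n : Int) (M : Int) (investments : List (Int × Int)) : Int :=
  let events := investments.foldl (fun acc p => acc ++ eventsOf p) ([] : List (Int × Int × Int))
  let evs := PySem.List.sorted events (fun e => e.1)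
  let bps := evs.map (fun e => e.1)
  let slopes := (evs.foldl (fun (st : Int × List Int) e =>
    (st.1 + e.2.1, st.2 ++ [st.1 + e.2.1])) ((0 : Int), [(0 : Int)])).2
  let inters := (evs.foldl (fun (st : Int × List Int) e =>
    (st.1 + e.2.2, st.2 ++ [st.1 + e.2.2])) ((0 : Int), [(0 : Int)])).2
  bLoop M bps slopes inters 1 pvCAP

-- ===== PRECONDITION & SPEC =====
def Spec_min_days_to_retire (n : Int) (M : Int) (investments : List (Int × Int)) (out : Int) : Prop := out = min_days_to_retire_alt n M investments
instance (n : Int) (M : Int) (investments : List (Int × Int)) (out : Int) : Decidable (Spec_min_days_to_retire n M investments out) := by unfold Spec_min_days_to_retire; infer_instance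

-- ===== CLAIM (what is proved, stated in full; the proofs are below) =====
def Claim_equal_min_days_to_retire : Prop := ∀ (n : Int) (M : Int) (investments : List (Int × Int)), Dom_min_days_to_retire n M investments → Spec_min_days_to_retire n M investments (min_days_to_retire n M investments)

-- ===== LEMMAS AND PROOFS =====

-- A's profit-minus-cost at day d, as a sum over the valid investments
def profA (d : Int) (inv : List (Int × Int)) : Int :=
  ((inv.filter (fun p => decide (p.2 ≤ d * p.1))).map (fun p => d * p.1 - p.2)).sum

lemma canRetire_eq (d n M : Int) (inv : List (Int × Int)) :
    canRetire d n M inv = decide (M ≤ profA d inv) := by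
  have hs : ∀ l : List (Int × Int),
      (l.map (fun p => d * p.1 - p.2)).sum
      = (l.map (fun p => p.1 * d)).sum - (l.map (fun p => p.2)).sum := by
    intro l; induction l with
    | nil => simp
    | cons a t ih => simp [ih]; ring
  unfold canRetire profA
  rw [PySem.List.foldl_append_ite_eq_filter (fun p => p.2 ≤ d * p.1) inv []]
  simp only [List.nil_append, PySem.List.foldl_add, zero_add, hs]

-- per-investment: the events of p that have fired by day d sum to p's contribution
lemma eventsOf_sum (p : Int × Int) (d : Int) (h1 : 1 ≤ d) (h2 : d ≤ pvCAP) :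
    (((eventsOf p).filter (fun e => decide (e.1 ≤ d))).map
      (fun e => d * e.2.1 - e.2.2)).sum
    = if p.2 ≤ d * p.1 then d * p.1 - p.2 else 0 := by
  obtain ⟨m, c⟩ := p
  simp only [eventsOf]
  by_cases hm : 0 < m
  · rw [if_pos hm]
    have h' : (-(PySem.Int.floordiv (-c) m) ≤ d) ↔ c ≤ d * m := by
      have h1 : (-(PySem.Int.floordiv (-c) m) ≤ d) ↔ (-d ≤ PySem.Int.floordiv (-c) m) := by omega
      rw [h1, PySem.Int.le_floordiv_iff_mul_le hm, neg_mul, neg_le_neg_iff]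
    have hiff : max 1 (-(PySem.Int.floordiv (-c) m)) ≤ d ↔ c ≤ d * m := by
      rw [max_le_iff]
      exact ⟨fun h => h'.1 h.2, fun h => ⟨h1, h'.2 h⟩⟩
    by_cases hc : max 1 (-(PySem.Int.floordiv (-c) m)) ≤ pvCAP
    · rw [if_pos hc]
      by_cases hd : max 1 (-(PySem.Int.floordiv (-c) m)) ≤ d
      · simp [hd, hiff.1 hd]
      · have hnc : ¬ c ≤ d * m := fun hcon => hd (hiff.2 hcon)
        simp [hd, hnc]
    · rw [if_neg hc]
      have : ¬ c ≤ d * m := fun hcon => hc (le_trans (hiff.2 hcon) h2)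
      simp [this]
  · by_cases hm0 : m = 0
    · subst hm0
      rw [if_neg hm, if_pos rfl]
      by_cases hc : c ≤ 0
      · simp [hc, h1]
      · simp [hc]
    · have hm' : m < 0 := by omega
      rw [if_neg hm, if_neg hm0]
      have hiff : d ≤ PySem.Int.floordiv c m ↔ c ≤ d * m := by
        rw [← PySem.Int.floordiv_neg_neg c m,
          PySem.Int.le_floordiv_iff_mul_le (show (0:Int) < -m by omega),
          mul_neg, neg_le_neg_iff]
      by_cases hs1 : PySem.Int.floordiv c m < 1
      · rw [if_pos hs1]
        have : ¬ c ≤ d * m := fun hcon => by have := hiff.2 hcon; omega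
        simp [this]
      · rw [if_neg hs1]
        by_cases hs2 : PySem.Int.floordiv c m < pvCAP
        · rw [if_pos hs2]
          by_cases hd : d ≤ PySem.Int.floordiv c m
          · have h2' : ¬ PySem.Int.floordiv c m + 1 ≤ d := by omega
            simp [h1, h2', hiff.1 hd]
          · have h2' : PySem.Int.floordiv c m + 1 ≤ d := by omega
            have : ¬ c ≤ d * m := fun hcon => hd (hiff.2 hcon)
            simp [h1, h2', this]
        · rw [if_neg hs2]
          have hd : d ≤ PySem.Int.floordiv c m := by omega
          simp [h1, hiff.1 hd]

lemma flatMap_events_sum (inv : List (Int × Int)) (d : Int) (h1 : 1 ≤ d) (h2 : d ≤ pvCAP) :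
    (((inv.flatMap eventsOf).filter (fun e => decide (e.1 ≤ d))).map
      (fun e => d * e.2.1 - e.2.2)).sum = profA d inv := by
  induction inv with
  | nil => simp [profA]
  | cons p t ih =>
    simp only [List.flatMap_cons, List.filter_append, List.map_append, List.sum_append, ih]
    rw [eventsOf_sum p d h1 h2]
    simp only [profA, List.filter_cons]
    by_cases hp : p.2 ≤ d * p.1 <;> simp [hp]

-- the running-sum list: element k is s0 + sum of the first (k+1) values of g
def pvPrefix (g : Int × Int × Int → Int) (s0 : Int) : List (Int × Int × Int) → List Int
  | [] => []
  | e :: t => (s0 + g e) :: pvPrefix g (s0 + g e) t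

lemma foldl_prefix (g : Int × Int × Int → Int) (l : List (Int × Int × Int)) :
    ∀ (s0 : Int) (acc : List Int),
      (l.foldl (fun st e => (st.1 + g e, st.2 ++ [st.1 + g e])) (s0, acc)).2
      = acc ++ pvPrefix g s0 l := by
  induction l with
  | nil => simp [pvPrefix]
  | cons e t ih => intro s0 acc; simp [pvPrefix, ih]

lemma prefix_getD (g : Int × Int × Int → Int) (l : List (Int × Int × Int)) :
    ∀ (idx : Nat) (s0 : Int), idx ≤ l.length →
      (s0 :: pvPrefix g s0 l).getD idx 0 = s0 + ((l.take idx).map g).sum := by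
  induction l with
  | nil =>
    intro idx s0 h
    have h0 : idx = 0 := by simpa using h
    subst h0; simp [pvPrefix]
  | cons e t ih =>
    intro idx s0 h
    match idx with
    | 0 => simp
    | Nat.succ k =>
      have := ih k (s0 + g e) (by simpa using h)
      simp only [pvPrefix, List.take_succ_cons, List.map_cons, List.sum_cons]
      simpa [add_assoc] using this

lemma bisLoop_spec (bps : List Int) (d : Int)
    (hmono : ∀ i j, i ≤ j → j < bps.length → bps.getD i 0 ≤ bps.getD j 0) :
    ∀ (lo hi : Nat), lo ≤ hi → hi ≤ bps.length →
      (∀ i, i < lo → bps.getD i 0 ≤ d) →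
      (∀ i, hi ≤ i → i < bps.length → ¬ bps.getD i 0 ≤ d) →
      (bisLoop bps d lo hi ≤ bps.length ∧
       (∀ i, i < bisLoop bps d lo hi → bps.getD i 0 ≤ d) ∧
       (∀ i, bisLoop bps d lo hi ≤ i → i < bps.length → ¬ bps.getD i 0 ≤ d)) := by
  suffices H : ∀ k lo hi, hi - lo ≤ k → lo ≤ hi → hi ≤ bps.length →
      (∀ i, i < lo → bps.getD i 0 ≤ d) →
      (∀ i, hi ≤ i → i < bps.length → ¬ bps.getD i 0 ≤ d) →
      (bisLoop bps d lo hi ≤ bps.length ∧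
       (∀ i, i < bisLoop bps d lo hi → bps.getD i 0 ≤ d) ∧
       (∀ i, bisLoop bps d lo hi ≤ i → i < bps.length → ¬ bps.getD i 0 ≤ d)) by
    intro lo hi h1 h2 h3 h4
    exact H (hi - lo) lo hi le_rfl h1 h2 h3 h4
  intro k
  induction k with
  | zero =>
    intro lo hi hk hle hlen hlow hhigh
    have h : ¬ lo < hi := by omega
    rw [bisLoop, dif_neg h]
    refine ⟨by omega, hlow, ?_⟩
    intro i hloi hil
    exact hhigh i (by omega) hil
  | succ k ih =>
    intro lo hi hk hle hlen hlow hhigh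
    rw [bisLoop]
    by_cases h : lo < hi
    · rw [dif_pos h]
      by_cases hc : bps.getD ((lo + hi) / 2) 0 ≤ d
      · rw [if_pos hc]
        apply ih ((lo + hi) / 2 + 1) hi (by omega) (by omega) hlen
        · intro i hi'
          have hmid : (lo + hi) / 2 < bps.length := by omega
          by_cases hilo : i < lo
          · exact hlow i hilo
          · exact le_trans (hmono i ((lo + hi) / 2) (by omega) hmid) hc
        · exact hhigh
      · rw [if_neg hc]
        apply ih lo ((lo + hi) / 2) (by omega) (by omega) (by omega) hlow
        intro i hmi hil hcon
        exact hc (le_trans (hmono ((lo + hi) / 2) i hmi hil) hcon)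
    · rw [dif_neg h]
      refine ⟨by omega, hlow, ?_⟩
      intro i hloi hil
      exact hhigh i (by omega) hil

lemma take_sum_lin (d : Int) (l : List (Int × Int × Int)) :
    (l.map (fun e => d * e.2.1 - e.2.2)).sum
    = d * (l.map (fun e => e.2.1)).sum - (l.map (fun e => e.2.2)).sum := by
  induction l with
  | nil => simp
  | cons a t ih => simp [ih]; ring

lemma profitQ_eq (evs : List (Int × Int × Int)) (d : Int)
    (hsort : evs.Pairwise (fun a b => a.1 ≤ b.1)) :
    profitQ (evs.map (fun e => e.1))
      ((evs.foldl (fun (st : Int × List Int) e =>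
        (st.1 + e.2.1, st.2 ++ [st.1 + e.2.1])) ((0 : Int), [(0 : Int)])).2)
      ((evs.foldl (fun (st : Int × List Int) e =>
        (st.1 + e.2.2, st.2 ++ [st.1 + e.2.2])) ((0 : Int), [(0 : Int)])).2) d
    = ((evs.filter (fun e => decide (e.1 ≤ d))).map (fun e => d * e.2.1 - e.2.2)).sum := by
  have hmono : ∀ i j, i ≤ j → j < (evs.map (fun e => e.1)).length →
      (evs.map (fun e => e.1)).getD i 0 ≤ (evs.map (fun e => e.1)).getD j 0 := by
    intro i j hij hj
    simp only [List.length_map] at hj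
    rw [List.getD_eq_getElem _ _ (by simp; omega),
        List.getD_eq_getElem _ _ (by simp; omega)]
    simp only [List.getElem_map]
    rcases Nat.lt_or_ge i j with hlt | hge
    · exact (List.pairwise_iff_getElem.1 hsort) i j (by omega) hj hlt
    · have : i = j := by omega
      subst this; exact le_rfl
  obtain ⟨hlen, hlow, hhigh⟩ := bisLoop_spec (evs.map (fun e => e.1)) d hmono
    0 (evs.map (fun e => e.1)).length (by omega) le_rfl
    (by intro i hi; omega) (by intro i h1 h2; omega)
  set idx := bisLoop (evs.map (fun e => e.1)) d 0 (evs.map (fun e => e.1)).length with hidx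
  have hlen' : idx ≤ evs.length := by simpa using hlen
  have hft : evs.filter (fun e => decide (e.1 ≤ d)) = evs.take idx := by
    conv_lhs => rw [← List.take_append_drop idx evs]
    rw [List.filter_append]
    have h1 : (evs.take idx).filter (fun e => decide (e.1 ≤ d)) = evs.take idx := by
      apply List.filter_eq_self.2
      intro a ha
      obtain ⟨i, hi, hai⟩ := List.mem_iff_getElem.1 ha
      have hilt : i < idx := by simp at hi; omega
      have := hlow i hilt
      rw [List.getD_eq_getElem _ _ (by simp; omega)] at this
      simp only [List.getElem_map] at this
      rw [← hai]
      simp only [List.getElem_take]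
      simpa using this
    have h2 : (evs.drop idx).filter (fun e => decide (e.1 ≤ d)) = [] := by
      apply List.filter_eq_nil_iff.2
      intro a ha
      obtain ⟨i, hi, hai⟩ := List.mem_iff_getElem.1 ha
      have hlt : idx + i < evs.length := by simp at hi; omega
      have := hhigh (idx + i) (by omega) (by simpa using hlt)
      rw [List.getD_eq_getElem _ _ (by simpa using hlt)] at this
      simp only [List.getElem_map] at this
      rw [← hai]
      simp only [List.getElem_drop]
      simpa using this
    rw [h1, h2, List.append_nil]
  unfold profitQ
  rw [← hidx]
  rw [foldl_prefix (fun e => e.2.1) evs 0 [0], foldl_prefix (fun e => e.2.2) evs 0 [0]]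
  simp only []
  have hsl : ([(0:Int)] ++ pvPrefix (fun e => e.2.1) 0 evs).getD idx 0
      = ((evs.take idx).map (fun e => e.2.1)).sum := by
    have := prefix_getD (fun e => e.2.1) evs idx 0 hlen'
    simpa using this
  have hin : ([(0:Int)] ++ pvPrefix (fun e => e.2.2) 0 evs).getD idx 0
      = ((evs.take idx).map (fun e => e.2.2)).sum := by
    have := prefix_getD (fun e => e.2.2) evs idx 0 hlen'
    simpa using this
  simp only [hsl, hin, hft, take_sum_lin]

lemma loops_eq (n M : Int) (inv : List (Int × Int)) (bps slopes inters : List Int)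
    (hpred : ∀ mid, 1 ≤ mid → mid ≤ pvCAP →
      canRetire mid n M inv = decide (M ≤ profitQ bps slopes inters mid)) :
    ∀ l r, 1 ≤ l → r ≤ pvCAP →
      aLoop n M inv l r = bLoop M bps slopes inters l r := by
  suffices H : ∀ k l r, (r - l).toNat ≤ k → 1 ≤ l → r ≤ pvCAP →
      aLoop n M inv l r = bLoop M bps slopes inters l r by
    intro l r h1 h2
    exact H (r - l).toNat l r le_rfl h1 h2
  intro k
  induction k with
  | zero =>
    intro l r hk h1 h2
    have h : ¬ l < r := by omega
    rw [aLoop, dif_neg h, bLoop, dif_neg h]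
  | succ k ih =>
    intro l r hk h1 h2
    by_cases h : l < r
    · have hmid : l + PySem.Int.floordiv (r - l) 2 = PySem.Int.floordiv (l + r) 2 := by
        rw [PySem.Int.floordiv_eq_ediv_of_pos (show (0:Int) < 2 by omega),
            PySem.Int.floordiv_eq_ediv_of_pos (show (0:Int) < 2 by omega)]
        omega
      have hc0 : (0:Int) ≤ PySem.Int.floordiv (r - l) 2 :=
        (PySem.Int.le_floordiv_iff_mul_le (a := r - l) (b := 2) (q := 0) (by omega)).2 (by omega)
      have hb1 : (1:Int) ≤ l + PySem.Int.floordiv (r - l) 2 := by omega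
      have hb2 : l + PySem.Int.floordiv (r - l) 2 < r := by
        have := (PySem.Int.floordiv_lt_iff_lt_mul (a := r - l) (b := 2) (q := r - l)
          (by omega)).2 (by omega)
        omega
      have hcq := hpred (l + PySem.Int.floordiv (r - l) 2) hb1 (by omega)
      rw [aLoop, dif_pos h, bLoop, dif_pos h, ← hmid]
      by_cases hc : canRetire (l + PySem.Int.floordiv (r - l) 2) n M inv = true
      · rw [hc] at hcq
        rw [if_pos hc, if_pos (of_decide_eq_true hcq.symm)]
        exact ih l _ (by omega) h1 (by omega)
      · rw [Bool.not_eq_true] at hc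
        rw [hc] at hcq
        rw [if_neg (by rw [hc]; exact Bool.false_ne_true),
            if_neg (of_decide_eq_false hcq.symm)]
        exact ih _ r (by omega) (by omega) h2
    · rw [aLoop, dif_neg h, bLoop, dif_neg h]

theorem main_eq (n M : Int) (inv : List (Int × Int)) :
    min_days_to_retire n M inv = min_days_to_retire_alt n M inv := by
  unfold min_days_to_retire min_days_to_retire_alt
  have hev : inv.foldl (fun acc p => acc ++ eventsOf p) ([] : List (Int × Int × Int))
      = inv.flatMap eventsOf := by
    rw [PySem.List.foldl_append_eq_flatMap, List.nil_append]
  set evs := PySem.List.sorted (inv.foldl (fun acc p => acc ++ eventsOf p) []) (fun e => e.1)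
    with hevs
  apply loops_eq
  · intro mid h1 h2
    rw [canRetire_eq, profitQ_eq evs mid (PySem.List.sorted_pairwise _ _)]
    have hperm : evs.Perm (inv.flatMap eventsOf) := by
      rw [hevs, hev]; exact PySem.List.sorted_perm _ _ _
    have := ((hperm.filter (fun e => decide (e.1 ≤ mid))).map
      (fun e => mid * e.2.1 - e.2.2)).sum_eq
    rw [this, flatMap_events_sum inv mid h1 h2]
  · omega
  · exact le_rfl

-- ===== VERDICT (by name: the statement is the Claim_ definition above) =====
theorem min_days_to_retire_spec : Claim_equal_min_days_to_retire := by
  intro n M inv _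
  unfold Spec_min_days_to_retire
  exact main_eq n M inv
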